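-- pv_equiv track=rewrite | github.com/basel-ganaim/testrepo | hw5_211447339.py | prefix_suffix_overlap_hash1
-- ===== SOURCE A (Python) =====
-- class Dict:
--     def __init__(self, m, hash_func=hash):
--         """ initial hash table, m empty entries """
--         self.table = [[] for i in range(m)]
--         self.hash_mod = lambda x: hash_func(x) % m
--
--     def __repr__(self):
--         L = [self.table[i] for i in range(len(self.table))]
--         return "".join([str(i) + " " + str(L[i]) + "\n" for i in range(len(self.table))])
--
--     def insert(self, key, value):
--         """ insert key,value into table
--             Allow repetitions of keys """
--         i = self.hash_mod(key)  # hash on key only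
--         item = [key, value]  # pack into one item
--         self.table[i].append(item)
--
--     def find(self, key):
--         """ returns ALL values of key as a list, empty list if none """
--         i = self.hash_mod(key)
--         lst = [item[1] for item in self.table[i] if item[0] == key]
--         return lst
--
-- def prefix_suffix_overlap_hash1(lst, k):
--     #we need to create now a hashtable,
--     # it hashes the key of the element we are working at at the moment
--     #and saves the element in the index i, we need to initiate the hashtable first, m-elements
--     # and hash functions
--
--     hashtable = Dict(len(lst)) #we created the hash
--     for i in range(len(lst)): #create a loop which iterates over the elmts of lst
--         hashtable.insert(lst[i][:k], i)
--         #now after creating the hash table, we need to iterate over the suffixs of the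
--         # elems in the list and by the hashed suffix, check if the hash is in the hashtable,
--         #  if yes, access the id in the table, iterate ovwer the lists inside it,
--         # with the list containing the second part of the lists
--     result = []
--     for j in range(len(lst)):
--         matching_indexes = hashtable.find(lst[j][-k:])
--
--         for i in matching_indexes:
--             if i != j:
--                 result.append((i,j))
--
--     return result
-- ===== SOURCE B (Python) =====
-- def prefix_suffix_overlap_hash1(lst, k):
--     n = len(lst)
--     result = []
--     for j in range(n):
--         suffix = lst[j][-k:]
--         for i in range(n):
--             if i != j and lst[i][:k] == suffix:
--                 result.append((i, j))
--     return result
-- ===== Notes on version B (the rewrite author's own statement) =====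
-- stated objective: simpler
-- what changed: Replaces A's hand-built bucketed hash table (insert every prefix, then look up each suffix's bucket and filter it) with a plain nested double loop that compares lst[i][:k] to lst[j][-k:] directly, producing the same pairs in the same order.
import Mathlib
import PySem

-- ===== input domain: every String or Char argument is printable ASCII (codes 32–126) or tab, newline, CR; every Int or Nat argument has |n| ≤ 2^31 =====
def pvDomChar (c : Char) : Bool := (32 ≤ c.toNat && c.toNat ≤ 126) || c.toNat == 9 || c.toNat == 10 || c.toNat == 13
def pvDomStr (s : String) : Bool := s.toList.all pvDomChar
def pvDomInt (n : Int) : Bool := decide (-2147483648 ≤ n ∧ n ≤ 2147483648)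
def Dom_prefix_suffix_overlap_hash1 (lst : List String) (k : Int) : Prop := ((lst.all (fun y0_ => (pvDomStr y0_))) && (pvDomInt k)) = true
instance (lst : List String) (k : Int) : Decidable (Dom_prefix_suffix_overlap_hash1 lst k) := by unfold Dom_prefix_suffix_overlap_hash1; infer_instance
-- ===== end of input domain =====

-- B replaces A's hand-rolled hash-table index (build prefix buckets, then look up each
-- suffix) by a plain nested double loop over index pairs; objective: simpler, same pairs
-- in the same order.


-- ===== PORT A =====
-- class Dict: self.table is a list of m buckets; each bucket holds [key, value] items.
-- CPython's default str hash is randomized per process and the function's result is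
-- provably independent of the hash function (find filters its bucket by key EQUALITY),
-- so the port instantiates hash_func with the constant-0 hash; everything else is exact.
def pvHashMod (m : Int) (_key : List Char) : Int := PySem.Int.mod 0 m  -- hash_func(x) % m

-- Dict.insert: self.table[i].append([key, value]) at i = hash_mod(key)
def pvDictInsert (m : Int) (table : List (List (List Char × Int)))
    (key : List Char) (value : Int) : List (List (List Char × Int)) :=
  let i := (pvHashMod m key).toNat  -- 0 ≤ hash % m < m, a valid bucket index
  table.set i ((table.getD i []) ++ [(key, value)])

-- Dict.find: [item[1] for item in self.table[i] if item[0] == key]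
def pvDictFind (m : Int) (table : List (List (List Char × Int)))
    (key : List Char) : List Int :=
  let i := (pvHashMod m key).toNat
  ((table.getD i []).filter (fun item => item.1 == key)).map (fun item => item.2)

def prefix_suffix_overlap_hash1 (lst : List String) (k : Int) : List (Int × Int) :=
  let m : Int := PySem.List.len lst
  -- Dict.__init__: self.table = [[] for i in range(m)]
  let table0 : List (List (List Char × Int)) :=
    (List.range lst.length).map (fun _ => [])
  -- for i in range(len(lst)): hashtable.insert(lst[i][:k], i)
  let table :=
    (PySem.List.pyRange 0 (PySem.List.len lst)).foldl
      (fun t i =>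
        pvDictInsert m t (PySem.List.slice (PySem.List.pyGetD lst i "").toList none (some k)) i)
      table0
  -- for j in range(len(lst)): for i in hashtable.find(lst[j][-k:]): if i != j: append (i, j)
  (PySem.List.pyRange 0 (PySem.List.len lst)).foldl
    (fun result j =>
      (pvDictFind m table (PySem.List.slice (PySem.List.pyGetD lst j "").toList (some (-k)) none)).foldl
        (fun result i => if i ≠ j then result ++ [(i, j)] else result)
        result)
    []

-- ===== PORT B =====
def prefix_suffix_overlap_hash1_alt (lst : List String) (k : Int) : List (Int × Int) :=
  (PySem.List.pyRange 0 (PySem.List.len lst)).foldl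
    (fun result j =>
      let suffix := PySem.List.slice (PySem.List.pyGetD lst j "").toList (some (-k)) none
      (PySem.List.pyRange 0 (PySem.List.len lst)).foldl
        (fun result i =>
          if i ≠ j ∧ PySem.List.slice (PySem.List.pyGetD lst i "").toList none (some k) = suffix
          then result ++ [(i, j)] else result)
        result)
    []

-- ===== PRECONDITION & SPEC =====
def Spec_prefix_suffix_overlap_hash1 (lst : List String) (k : Int) (out : List (Int × Int)) : Prop := out = prefix_suffix_overlap_hash1_alt lst k
instance (lst : List String) (k : Int) (out : List (Int × Int)) : Decidable (Spec_prefix_suffix_overlap_hash1 lst k out) := by unfold Spec_prefix_suffix_overlap_hash1; infer_instance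

-- ===== CLAIM (what is proved, stated in full; the proofs are below) =====
def Claim_equal_prefix_suffix_overlap_hash1 : Prop := ∀ (lst : List String) (k : Int), Dom_prefix_suffix_overlap_hash1 lst k → Spec_prefix_suffix_overlap_hash1 lst k (prefix_suffix_overlap_hash1 lst k)

-- ===== LEMMAS AND PROOFS =====

-- all inserts land in bucket 0 (constant-0 hash), appended in loop order
theorem pv_insert_fold (pref : Int → List Char) (m : Int) :
    ∀ (l : List Int) (b : List (List Char × Int)) (rest : List (List (List Char × Int))),
      l.foldl (fun t i => pvDictInsert m t (pref i) i) (b :: rest)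
        = (b ++ l.map (fun i => (pref i, i))) :: rest := by
  intro l
  induction l with
  | nil => intro b rest; simp
  | cons x l ih =>
    intro b rest
    have hz : (pvHashMod m (pref x)).toNat = 0 := by
      simp [pvHashMod, PySem.Int.mod]
    have hstep : pvDictInsert m (b :: rest) (pref x) x = (b ++ [(pref x, x)]) :: rest := by
      simp [pvDictInsert, hz]
    rw [List.foldl_cons, hstep, ih]
    simp

-- find on the one-bucket table = the indexes whose prefix equals the key, in order
theorem pv_find_eq (pref : Int → List Char) (m : Int)
    (l : List Int) (rest : List (List (List Char × Int))) (key : List Char) :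
    pvDictFind m ((l.map (fun i => (pref i, i))) :: rest) key
      = l.filter (fun i => pref i == key) := by
  have hz : (pvHashMod m key).toNat = 0 := by simp [pvHashMod, PySem.Int.mod]
  simp [pvDictFind, hz, List.filter_map, Function.comp_def, List.map_map]

-- A's inner loop over the pre-filtered match list = B's inner loop over all indexes
theorem pv_inner_eq (pref : Int → List Char) (s : List Char) (j : Int) :
    ∀ (l : List Int) (res : List (Int × Int)),
      ((l.filter (fun i => pref i == s)).foldl
          (fun res i => if i ≠ j then res ++ [(i, j)] else res) res)
        = l.foldl (fun res i => if i ≠ j ∧ pref i = s then res ++ [(i, j)] else res) res := by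
  intro l
  induction l with
  | nil => intro res; rfl
  | cons x l ih =>
    intro res
    by_cases h : pref x = s
    · simp only [List.filter_cons, h, beq_self_eq_true, if_pos, List.foldl_cons, and_true, ih]
    · have : (pref x == s) = false := by simp [h]
      simp only [List.filter_cons, this, Bool.false_eq_true, if_neg, List.foldl_cons, ih,
        h, and_false, not_false_iff]

-- ===== VERDICT (by name: the statement is the Claim_ definition above) =====
theorem prefix_suffix_overlap_hash1_spec : Claim_equal_prefix_suffix_overlap_hash1 := by
  intro lst k _
  unfold Spec_prefix_suffix_overlap_hash1 prefix_suffix_overlap_hash1 prefix_suffix_overlap_hash1_alt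
  cases lst with
  | nil => rfl
  | cons s0 tl =>
    dsimp only [prefix_suffix_overlap_hash1, prefix_suffix_overlap_hash1_alt]
    have htable0 : (List.range (s0 :: tl).length).map
        (fun _ => ([] : List (List Char × Int)))
        = [] :: List.replicate ((s0 :: tl).length - 1) [] := by
      simp [List.replicate_succ]
    rw [htable0, pv_insert_fold, List.nil_append]
    apply PySem.List.foldl_congr_mem
    intro acc j _
    rw [pv_find_eq, pv_inner_eq]
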